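-- pv_equiv track=rewrite | github.com/BTung0109/BTAP_TRI_TUE_NHAN_TAO | BUOI_8/BUOI_8_DLS.py | dls_nghiem_xe
-- ===== SOURCE A (Python) =====
-- BAN_CO = 8
--
-- def dls_nghiem_xe(gioi_han):
--
--     n = BAN_CO
--     danh_sach = []
--
--     def backtrack(hang, used_cols):
--         # hang: so hang da dat (cung la len(danh_sach))
--         # neu da vuot gioi han thi dung
--         if hang > gioi_han:
--             return
--         if hang == n:
--             # dat du 8 xe -> tra ve nghiem
--             yield [(r, danh_sach[r]) for r in range(n)]
--             return
--         # neu hang == gioi_han ma < n thi khong du toi muc -> ko tiep tuc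
--         if hang == gioi_han and hang < n:
--             return
--
--         for cot in range(n):
--             if cot in used_cols:
--                 continue
--             # dat xe o (hang, cot)
--             danh_sach.append(cot)
--             used_cols.add(cot)
--             # de quy
--             yield from backtrack(hang + 1, used_cols)
--             # quay lui
--             used_cols.remove(cot)
--             danh_sach.pop()
--
--     yield from backtrack(0, set())
-- ===== SOURCE B (Python) =====
-- BAN_CO = 8
--
-- def dls_nghiem_xe(gioi_han):
--     # Factorial-number-system enumeration: the k-th lexicographic permutation is
--     # obtained by decoding k in the factorial base; no recursion, no backtracking.
--     n = BAN_CO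
--     if gioi_han >= n:
--         total = 1
--         for r in range(2, n + 1):
--             total *= r
--         for k in range(total):
--             avail = list(range(n))
--             perm = []
--             rem = k
--             f = total
--             for pos in range(n):
--                 f //= n - pos
--                 idx, rem = divmod(rem, f)
--                 perm.append(avail.pop(idx))
--             yield [(r, perm[r]) for r in range(n)]
-- ===== Notes on version B (the rewrite author's own statement) =====
-- stated objective: alternative
-- what changed: Replaces the recursive backtracking generator with a mutable column list and used-set by an iterative factorial-number-system decoder: for each k below 8 factorial, the k-th lexicographic permutation is computed arithmetically (divmod), with no recursion and no backtracking.
import Mathlib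
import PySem

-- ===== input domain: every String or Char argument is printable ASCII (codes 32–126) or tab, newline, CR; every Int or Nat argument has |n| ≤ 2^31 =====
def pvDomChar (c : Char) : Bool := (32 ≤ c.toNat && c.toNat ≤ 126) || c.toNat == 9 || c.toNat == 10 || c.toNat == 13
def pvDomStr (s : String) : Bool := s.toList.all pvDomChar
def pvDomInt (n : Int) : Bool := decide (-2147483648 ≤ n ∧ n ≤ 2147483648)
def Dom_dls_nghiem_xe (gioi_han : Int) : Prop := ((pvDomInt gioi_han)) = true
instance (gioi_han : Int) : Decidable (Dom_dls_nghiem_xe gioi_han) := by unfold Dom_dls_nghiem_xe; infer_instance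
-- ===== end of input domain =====

-- B replaces A's recursive backtracking (mutable column list + used-set) by an iterative
-- factorial-number-system decoder of the k-th lexicographic permutation (objective: alternative).
-- Both functions are Python GENERATORS of per-solution lists of 8 (row, col) pairs; per the required
-- return type List (Int × Int) the equivalence is about the concatenation of all yielded pairs.

-- ===== PORT A =====
-- Backtracking: the python mutates danh_sach/used_cols around each recursive call
-- (append/add before, pop/remove after); passing the extended list/set down is the same values.
-- fuel: hang grows by 1 per call and the 'hang == n' branch returns at 8, so depth ≤ 9.
-- danh_sach[r] at the yield has 0 ≤ r < len(danh_sach) = 8, so pyGetD is exact there.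
def pvBTA (gioi_han : Int) : Nat → Nat → List Int → PySem.Set Int → List (Int × Int)
  | 0, _, _, _ => []
  | fuel+1, hang, danh_sach, used_cols =>
    if (hang : Int) > gioi_han then []
    else if hang = 8 then (PySem.List.pyRange 0 8 1).map (fun r => (r, PySem.List.pyGetD danh_sach r 0))
    else if (hang : Int) = gioi_han ∧ hang < 8 then []
    else (PySem.List.pyRange 0 8 1).foldl (fun acc cot =>
      if cot ∈ used_cols then acc
      else acc ++ pvBTA gioi_han fuel (hang+1) (danh_sach ++ [cot]) (PySem.Set.add used_cols cot)) []

def dls_nghiem_xe (gioi_han : Int) : List (Int × Int) := pvBTA gioi_han 9 0 [] PySem.Set.empty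

-- ===== PORT B =====
-- inner loop body of Source B: f //= n - pos; idx, rem = divmod(rem, f); perm.append(avail.pop(idx))
-- state = (avail, perm, rem, f); the pop never fails in Source B (0 ≤ idx < len(avail)), the none arm is unreachable.
def pvDecodeStep (st : List Int × List Int × Int × Int) (pos : Int) : List Int × List Int × Int × Int :=
  let f := PySem.Int.floordiv st.2.2.2 (8 - pos)
  let idx := PySem.Int.floordiv st.2.2.1 f
  let rem := PySem.Int.mod st.2.2.1 f
  match PySem.List.pop? st.1 idx with
  | some (x, avail') => (avail', st.2.1 ++ [x], rem, f)
  | none => (st.1, st.2.1, rem, f)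

def dls_nghiem_xe_alt (gioi_han : Int) : List (Int × Int) :=
  if gioi_han ≥ 8 then
    let total : Int := (PySem.List.pyRange 2 9 1).foldl (fun t r => t * r) 1
    (PySem.List.pyRange 0 total 1).foldl (fun out k =>
      let st := (PySem.List.pyRange 0 8 1).foldl pvDecodeStep (PySem.List.pyRange 0 8 1, [], k, total)
      out ++ (PySem.List.pyRange 0 8 1).map (fun r => (r, PySem.List.pyGetD st.2.1 r 0))) []
  else []

-- ===== PRECONDITION & SPEC =====
def Spec_dls_nghiem_xe (gioi_han : Int) (out : List (Int × Int)) : Prop := out = dls_nghiem_xe_alt gioi_han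
instance (gioi_han : Int) (out : List (Int × Int)) : Decidable (Spec_dls_nghiem_xe gioi_han out) := by unfold Spec_dls_nghiem_xe; infer_instance

-- ===== CLAIM (what is proved, stated in full; the proofs are below) =====
def Claim_equal_dls_nghiem_xe : Prop := ∀ (gioi_han : Int), Dom_dls_nghiem_xe gioi_han → Spec_dls_nghiem_xe gioi_han (dls_nghiem_xe gioi_han)

-- ===== LEMMAS AND PROOFS =====

-- the concatenated yield of one permutation p (both ports' comprehension [(r, p[r]) for r in range(8)])
def pvRowP (p : List Int) : List (Int × Int) :=
  (PySem.List.pyRange 0 8 1).map (fun r => (r, PySem.List.pyGetD p r 0))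

-- all permutations of avail, lexicographically, by first-element index; fuel = avail.length
def pvPermsF : Nat → List Int → List (List Int)
  | 0, _ => [[]]
  | m+1, avail => (List.range avail.length).flatMap
      (fun i => (pvPermsF m (avail.eraseIdx i)).map (fun p => avail.getD i 0 :: p))

-- the k-th lexicographic permutation of avail (factorial-base decoding); fuel = avail.length
def pvNthF : Nat → List Int → Int → List Int
  | 0, _, _ => []
  | m+1, avail, rem =>
    let f : Int := (Nat.factorial m : Int)
    let i := (PySem.Int.floordiv rem f).toNat
    avail.getD i 0 :: pvNthF m (avail.eraseIdx i) (PySem.Int.mod rem f)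

def pvBase : List Int := PySem.List.pyRange 0 8 1

def pvAvailOf (used : List Int) : List Int := pvBase.filter (fun x => decide (¬ x ∈ used))

-- A prunes everything when gioi_han < 8
theorem pvBTA_prune (g : Int) (hg : g < 8) :
    ∀ fuel hang ds used, pvBTA g fuel hang ds used = [] := by
  intro fuel
  induction fuel with
  | zero => intro hang ds used; rfl
  | succ f ih =>
    intro hang ds used
    rw [pvBTA]
    by_cases h1 : (hang : Int) > g
    · simp [h1]
    · have h8 : ¬ hang = 8 := by omega
      by_cases h3 : (hang : Int) = g ∧ hang < 8
      · simp [h8, h3]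
      · simp only [if_neg h1, if_neg h8, if_neg h3]
        have step : ∀ (l : List Int) (acc : List (Int × Int)), acc = [] →
            List.foldl (fun acc cot => if cot ∈ used then acc
              else acc ++ pvBTA g f (hang+1) (ds ++ [cot]) (PySem.Set.add used cot)) acc l = [] := by
          intro l
          induction l with
          | nil => intro acc h; exact h
          | cons x xs ihl =>
            intro acc h
            rw [List.foldl_cons]
            apply ihl
            split
            · exact h
            · rw [h, ih]; rfl
        exact step _ [] rfl

theorem pvBase_nodup : pvBase.Nodup := by decide

theorem pvAvail_nodup (used : List Int) : (pvAvailOf used).Nodup :=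
  List.Nodup.filter _ pvBase_nodup

theorem pvFoldl_skip (used : List Int) (R : Int → List (Int × Int)) :
    ∀ (l : List Int) (acc : List (Int × Int)),
      List.foldl (fun acc cot => if cot ∈ used then acc else acc ++ R cot) acc l
        = acc ++ (l.filter (fun x => decide (¬ x ∈ used))).flatMap R := by
  intro l
  induction l with
  | nil => intro acc; simp
  | cons x xs ih =>
    intro acc
    rw [List.foldl_cons]
    by_cases hx : x ∈ used
    · rw [if_pos hx, ih, List.filter_cons_of_neg (by simp [hx])]
    · rw [if_neg hx, ih, List.filter_cons_of_pos (by simp [hx]), List.flatMap_cons,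
        List.append_assoc]

theorem pvSet_add_eq (used : List Int) (c : Int) (hc : ¬ c ∈ used) :
    PySem.Set.add used c = used ++ [c] := by
  simp [PySem.Set.add, PySem.Set.contains, hc]

theorem pvAvail_append (used : List Int) (c : Int) :
    pvAvailOf (used ++ [c]) = (pvAvailOf used).erase c := by
  rw [List.Nodup.erase_eq_filter (pvAvail_nodup used) c]
  unfold pvAvailOf
  rw [List.filter_filter]
  apply List.filter_congr
  intro x hx
  by_cases hxu : x ∈ used <;> by_cases hxc : x = c <;> simp [hxu, hxc]

theorem pvFlatMap_idx {β : Type} :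
    ∀ (l : List Int) (G : Int → List Int → List β), l.Nodup →
      (List.range l.length).flatMap (fun i => G (l.getD i 0) (l.eraseIdx i))
        = l.flatMap (fun c => G c (l.erase c)) := by
  intro l
  induction l with
  | nil => intro G _; simp
  | cons x xs ih =>
    intro G hnd
    have hx : x ∉ xs := (List.nodup_cons.mp hnd).1
    have hxs : xs.Nodup := (List.nodup_cons.mp hnd).2
    rw [List.length_cons, List.range_succ_eq_map, List.flatMap_cons, List.flatMap_map]
    simp only [List.getD_cons_zero, List.eraseIdx_cons_zero, Nat.succ_eq_add_one,
      List.getD_cons_succ, List.eraseIdx_cons_succ]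
    rw [ih (fun c l' => G c (x :: l')) hxs]
    rw [List.flatMap_cons, List.erase_cons_head]
    congr 1
    apply List.flatMap_congr
    intro c hc
    have hcx : ¬ (x == c) = true := by
      simp only [beq_iff_eq]
      rintro rfl
      exact hx hc
    rw [List.erase_cons_tail hcx]

theorem pvA_main (g : Int) (hg : 8 ≤ g) :
    ∀ m fuel (ds used : List Int), m < fuel → ds.length + m = 8 → (pvAvailOf used).length = m →
      pvBTA g fuel ds.length ds used = (pvPermsF m (pvAvailOf used)).flatMap (fun p => pvRowP (ds ++ p)) := by
  intro m
  induction m with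
  | zero =>
    intro fuel ds used hfuel hds hav
    obtain ⟨f, rfl⟩ : ∃ f, fuel = f + 1 := ⟨fuel - 1, by omega⟩
    rw [pvBTA]
    have h8 : ds.length = 8 := by omega
    rw [if_neg (by rw [h8]; omega), if_pos h8]
    have hav0 : pvAvailOf used = [] := List.length_eq_zero_iff.mp hav
    rw [hav0]
    simp [pvPermsF, pvRowP]
  | succ m ihm =>
    intro fuel ds used hfuel hds hav
    obtain ⟨f, rfl⟩ : ∃ f, fuel = f + 1 := ⟨fuel - 1, by omega⟩
    rw [pvBTA]
    have hlen : ds.length ≤ 7 := by omega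
    rw [if_neg (by omega), if_neg (by omega), if_neg (by omega)]
    rw [pvFoldl_skip used _ _ [], List.nil_append]
    have hfilter : (PySem.List.pyRange 0 8 1).filter (fun x => decide (¬ x ∈ used)) = pvAvailOf used := rfl
    rw [hfilter]
    have hbody : ∀ c ∈ pvAvailOf used,
        pvBTA g f (ds.length + 1) (ds ++ [c]) (PySem.Set.add used c)
          = (pvPermsF m ((pvAvailOf used).erase c)).flatMap (fun p => pvRowP (ds ++ (c :: p))) := by
      intro c hc
      have hcu : ¬ c ∈ used := by
        have := List.of_mem_filter hc
        simpa using this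
      rw [pvSet_add_eq used c hcu]
      have hlen' : (ds ++ [c]).length = ds.length + 1 := by simp
      rw [show ds.length + 1 = (ds ++ [c]).length from hlen'.symm]
      rw [ihm f (ds ++ [c]) (used ++ [c]) (by omega) (by simp; omega)
        (by rw [pvAvail_append used c, List.length_erase_of_mem hc, hav]; omega)]
      rw [pvAvail_append used c]
      apply List.flatMap_congr
      intro p _
      rw [List.append_assoc]
      rfl
    rw [List.flatMap_congr hbody]
    rw [pvPermsF, List.flatMap_assoc]
    simp only [List.flatMap_map]
    rw [pvFlatMap_idx (pvAvailOf used)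
        (fun c l' => (pvPermsF m l').flatMap (fun p => pvRowP (ds ++ (c :: p)))) (pvAvail_nodup used)]

theorem pvPyRange0 (n : Nat) : PySem.List.pyRange 0 (n : Int) 1 = (List.range n).map (fun (k : Nat) => (k : Int)) := by
  rw [PySem.List.pyRange_one]
  simp only [sub_zero, Int.toNat_natCast, zero_add]

theorem pvRangeMul (a b : Nat) :
    List.range (a * b) = (List.range a).flatMap (fun i => (List.range b).map (fun r => i * b + r)) := by
  induction a with
  | zero => simp
  | succ a ih =>
    rw [Nat.succ_mul, List.range_add, ih, List.range_succ]
    simp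

theorem pvInner : ∀ (m : Nat) (s : Int) (avail perm : List Int) (rem : Int),
    s + m = 8 → avail.length = m → 0 ≤ rem → rem < (Nat.factorial m : Int) →
    (PySem.List.pyRange s 8 1).foldl pvDecodeStep (avail, perm, rem, (Nat.factorial m : Int))
      = ([], perm ++ pvNthF m avail rem, 0, 1) := by
  intro m
  induction m with
  | zero =>
    intro s avail perm rem hs hl hr0 hr1
    have hs8 : s = 8 := by push_cast at hs; omega
    rw [hs8, PySem.List.pyRange_one_eq_nil le_rfl, List.foldl_nil]
    have havail : avail = [] := List.length_eq_zero_iff.mp hl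
    have hrem : rem = 0 := by simp [Nat.factorial] at hr1; omega
    simp [havail, hrem, pvNthF, Nat.factorial]
  | succ m ih =>
    intro s avail perm rem hs hl hr0 hr1
    have hslt : s < 8 := by push_cast at hs; omega
    rw [PySem.List.pyRange_one_cons hslt, List.foldl_cons]
    have hfpos : (0 : Int) < (Nat.factorial m : Int) := by exact_mod_cast Nat.factorial_pos m
    have h8s : (8 : Int) - s = ((m + 1 : Nat) : Int) := by push_cast at hs ⊢; omega
    have hfact : ((Nat.factorial (m+1) : Nat) : Int) = ((m + 1 : Nat) : Int) * (Nat.factorial m : Int) := by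
      push_cast [Nat.factorial_succ]; ring
    have hfdiv : PySem.Int.floordiv ((Nat.factorial (m+1) : Nat) : Int) ((8 : Int) - s) = (Nat.factorial m : Int) := by
      rw [h8s, PySem.Int.floordiv_eq_ediv_of_pos (by positivity), hfact,
        Int.mul_ediv_cancel_left _ (by positivity)]
    have hidx0 : 0 ≤ rem / (Nat.factorial m : Int) := Int.ediv_nonneg hr0 hfpos.le
    have hidxlt : rem / (Nat.factorial m : Int) < ((m + 1 : Nat) : Int) := by
      rw [Int.ediv_lt_iff_lt_mul hfpos]
      rw [hfact] at hr1
      linarith [hr1]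
    have hiN : rem / (Nat.factorial m : Int) = (((rem / (Nat.factorial m : Int)).toNat : Nat) : Int) :=
      (Int.toNat_of_nonneg hidx0).symm
    have hiNlt : (rem / (Nat.factorial m : Int)).toNat < avail.length := by
      rw [hl]; omega
    have hstep : pvDecodeStep (avail, perm, rem, ((Nat.factorial (m+1) : Nat) : Int)) s
        = (avail.eraseIdx (rem / (Nat.factorial m : Int)).toNat,
           perm ++ [avail[(rem / (Nat.factorial m : Int)).toNat]],
           PySem.Int.mod rem (Nat.factorial m : Int), (Nat.factorial m : Int)) := by
      unfold pvDecodeStep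
      simp only [hfdiv]
      rw [PySem.Int.floordiv_eq_ediv_of_pos hfpos]
      conv_lhs => rw [hiN, PySem.List.pop?_natCast avail _ hiNlt]
    rw [hstep]
    have hmod : PySem.Int.mod rem (Nat.factorial m : Int) = rem % (Nat.factorial m : Int) :=
      PySem.Int.mod_eq_emod_of_pos hfpos
    rw [hmod]
    rw [ih (s+1) _ _ _ (by push_cast at hs ⊢; omega)
      (by rw [List.length_eraseIdx]; simp [hiNlt]; omega)
      (Int.emod_nonneg rem (by positivity)) (Int.emod_lt_of_pos rem hfpos)]
    show _ = ([], perm ++ pvNthF (m+1) avail rem, (0:Int), (1:Int))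
    simp only [pvNthF]
    simp only [PySem.Int.floordiv_eq_ediv_of_pos hfpos, PySem.Int.mod_eq_emod_of_pos hfpos]
    rw [List.getD_eq_getElem avail 0 hiNlt]
    simp [List.append_assoc]

theorem pvMapN : ∀ (m : Nat) (avail : List Int), avail.length = m →
    (List.range (Nat.factorial m)).map (fun (k : Nat) => pvNthF m avail (k : Int)) = pvPermsF m avail := by
  intro m
  induction m with
  | zero =>
    intro avail hl
    simp [Nat.factorial, List.range_succ, pvNthF, pvPermsF]
  | succ m ih =>
    intro avail hl
    rw [Nat.factorial_succ, pvRangeMul (m+1) (Nat.factorial m), List.map_flatMap, pvPermsF, hl]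
    apply List.flatMap_congr
    intro i hi
    have hilt : i < m + 1 := List.mem_range.mp hi
    have hfpos : (0 : Int) < (Nat.factorial m : Int) := by exact_mod_cast Nat.factorial_pos m
    have hbody : ∀ r ∈ List.range (Nat.factorial m),
        ((fun (k : Nat) => pvNthF (m+1) avail (k : Int)) ∘ (fun (r : Nat) => i * Nat.factorial m + r)) r
          = avail.getD i 0 :: pvNthF m (avail.eraseIdx i) (r : Int) := by
      intro r hr
      have hrlt : r < Nat.factorial m := List.mem_range.mp hr
      simp only [Function.comp_apply, pvNthF]
      have hcast : ((i * Nat.factorial m + r : Nat) : Int)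
          = (r : Int) + (i : Int) * (Nat.factorial m : Int) := by push_cast; ring
      have hdiv : PySem.Int.floordiv ((i * Nat.factorial m + r : Nat) : Int) (Nat.factorial m : Int) = (i : Int) := by
        rw [hcast, PySem.Int.floordiv_eq_ediv_of_pos hfpos,
          Int.add_mul_ediv_right _ _ (by positivity),
          Int.ediv_eq_zero_of_lt (by positivity) (by exact_mod_cast hrlt), zero_add]
      have hmod : PySem.Int.mod ((i * Nat.factorial m + r : Nat) : Int) (Nat.factorial m : Int) = (r : Int) := by
        rw [hcast, PySem.Int.mod_eq_emod_of_pos hfpos, mul_comm (i:Int) ((Nat.factorial m : Nat):Int), Int.add_mul_emod_self_left,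
          Int.emod_eq_of_lt (by positivity) (by exact_mod_cast hrlt)]
      rw [hdiv, hmod]
      simp
    rw [List.map_map, List.map_congr_left hbody]
    have heq : (fun p => avail.getD i 0 :: p) ∘ (fun (r : Nat) => pvNthF m (avail.eraseIdx i) (r : Int))
        = fun (r : Nat) => avail.getD i 0 :: pvNthF m (avail.eraseIdx i) (r : Int) := rfl
    rw [← heq, ← List.map_map, ih (avail.eraseIdx i) (by rw [List.length_eraseIdx, hl, if_pos hilt]; omega)]

theorem pvB_main (g : Int) (hg : 8 ≤ g) :
    dls_nghiem_xe_alt g = (pvPermsF 8 pvBase).flatMap pvRowP := by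
  unfold dls_nghiem_xe_alt
  rw [if_pos hg]
  have ht : (PySem.List.pyRange 2 9 1).foldl (fun t r => t * r) 1 = (40320 : Int) := by decide
  simp only [ht]
  rw [PySem.List.foldl_append_eq_flatMap, List.nil_append]
  have hcongr : ∀ k ∈ PySem.List.pyRange 0 40320 1,
      (PySem.List.pyRange 0 8 1).map
        (fun r => (r, PySem.List.pyGetD
          (((PySem.List.pyRange 0 8 1).foldl pvDecodeStep (PySem.List.pyRange 0 8 1, [], k, (40320:Int))).2.1) r 0))
        = pvRowP (pvNthF 8 pvBase k) := by
    intro k hk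
    have hk' : 0 ≤ k ∧ k < 40320 := PySem.List.mem_pyRange_one.mp hk
    rw [show (40320 : Int) = ((Nat.factorial 8 : Nat) : Int) by norm_num [Nat.factorial]]
    rw [pvInner 8 0 (PySem.List.pyRange 0 8 1) [] k (by norm_num) (by decide)
      hk'.1 (by rw [show ((Nat.factorial 8 : Nat) : Int) = 40320 by norm_num [Nat.factorial]]; exact hk'.2)]
    rfl
  rw [List.flatMap_congr hcongr]
  rw [show (40320 : Int) = ((40320 : Nat) : Int) by norm_num, pvPyRange0, List.flatMap_map]
  rw [show (fun (a : Nat) => pvRowP (pvNthF 8 pvBase (a : Int)))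
      = fun (a : Nat) => pvRowP ((fun (k : Nat) => pvNthF 8 pvBase (k : Int)) a) from rfl,
    ← List.flatMap_map, show (40320 : Nat) = Nat.factorial 8 by norm_num [Nat.factorial],
    pvMapN 8 pvBase (by decide)]


-- ===== VERDICT (by name: the statement is the Claim_ definition above) =====
theorem dls_nghiem_xe_spec : Claim_equal_dls_nghiem_xe := by
  intro g _
  unfold Spec_dls_nghiem_xe dls_nghiem_xe
  by_cases hg : 8 ≤ g
  · have hA := pvA_main g hg 8 9 [] [] (by omega) (by simp) (by decide)
    simp only [List.length_nil] at hA
    rw [show (PySem.Set.empty : PySem.Set Int) = ([] : List Int) from rfl, hA, pvB_main g hg]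
    simp [pvAvailOf, pvBase]
  · rw [pvBTA_prune g (by omega), dls_nghiem_xe_alt]
    simp [hg]
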